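-- pv_equiv track=rewrite | github.com/paulinapp1/pp1-rozwiazania | testpp1/test2_2.py | f
-- ===== SOURCE A (Python) =====
-- def f(register):
--     current_status=0
--     for status in register:
--         if status=='+':
--             current_status+=1
--         else:
--             current_status=current_status-1
--     return current_status
-- ===== SOURCE B (Python) =====
-- def f(register):
--     return 2 * register.count('+') - len(register)
-- ===== Notes on version B (the rewrite author's own statement) =====
-- stated objective: faster
-- what changed: Replaced the per-character accumulator loop with the closed form 2*count('+') - len(register), since every non-plus character subtracts one.
import Mathlib
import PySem

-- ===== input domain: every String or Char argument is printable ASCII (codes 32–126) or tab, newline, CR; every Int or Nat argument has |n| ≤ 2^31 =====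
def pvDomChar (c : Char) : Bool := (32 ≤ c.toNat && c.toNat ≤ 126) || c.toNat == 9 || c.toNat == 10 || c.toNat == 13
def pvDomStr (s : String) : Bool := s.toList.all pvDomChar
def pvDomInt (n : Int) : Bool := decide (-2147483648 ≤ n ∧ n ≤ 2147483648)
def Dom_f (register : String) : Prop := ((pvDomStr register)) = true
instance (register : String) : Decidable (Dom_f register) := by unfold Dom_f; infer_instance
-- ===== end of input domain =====

-- B replaces A's per-character accumulator loop by the closed form 2*count plus - len (measured faster: C-level count vs interpreted loop).

-- ===== PORT A =====
-- loop: +1 for each '+', -1 for any other character, starting from 0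
def f (register : String) : Int :=
  register.toList.foldl (fun current_status status =>
    if status == '+' then current_status + 1 else current_status - 1) 0

-- ===== PORT B =====
def f_alt (register : String) : Int :=
  2 * (PySem.Str.count register "+" : Int) - PySem.Str.len register

-- ===== PRECONDITION & SPEC =====
def Spec_f (register : String) (out : Int) : Prop := out = f_alt register
instance (register : String) (out : Int) : Decidable (Spec_f register out) := by unfold Spec_f; infer_instance

-- ===== CLAIM (what is proved, stated in full; the proofs are below) =====
def Claim_equal_f : Prop := ∀ (register : String), Dom_f register → Spec_f register (f register)

-- ===== LEMMAS AND PROOFS =====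

-- Python's str.count with a single-character needle is the character count.
theorem count_go_single (c : Char) :
    ∀ (l : List Char) (fuel acc : Nat), l.length ≤ fuel →
      PySem.Chars.count.go [c] fuel l acc = acc + l.count c := by
  intro l
  induction l with
  | nil =>
      intro fuel acc _
      cases fuel <;> simp [PySem.Chars.count.go]
  | cons h t ih =>
      intro fuel acc hle
      cases fuel with
      | zero => simp at hle
      | succ n =>
        have hle' : t.length ≤ n := by simpa using hle
        by_cases hc : h = c
        · subst hc
          rw [show PySem.Chars.count.go [h] (n+1) (h :: t) acc
                = PySem.Chars.count.go [h] n t (acc+1) from by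
              simp [PySem.Chars.count.go, List.isPrefixOf]]
          rw [ih n (acc+1) hle', List.count_cons]
          simp
          omega
        · rw [show PySem.Chars.count.go [c] (n+1) (h :: t) acc
                = PySem.Chars.count.go [c] n t acc from by
              simp [PySem.Chars.count.go, List.isPrefixOf, Ne.symm hc]]
          rw [ih n acc hle', List.count_cons]
          simp [hc]

theorem count_plus (s : String) :
    PySem.Str.count s "+" = s.toList.count '+' := by
  rw [PySem.Str.count_eq]
  have h : ("+" : String).toList = ['+'] := by decide
  rw [h]
  have hlen : s.toList.length ≤ s.length := by rw [String.length_toList]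
  have hg := count_go_single '+' s.toList s.length 0 hlen
  simp [PySem.Chars.count, hg]

theorem foldl_closed (l : List Char) :
    ∀ acc : Int,
      l.foldl (fun current_status status =>
        if status == '+' then current_status + 1 else current_status - 1) acc
        = acc + 2 * (l.count '+' : Int) - l.length := by
  induction l with
  | nil => intro acc; simp
  | cons h t ih =>
      intro acc
      rw [List.foldl_cons]
      by_cases hc : h = '+'
      · subst hc
        simp only [beq_self_eq_true, if_true]
        rw [ih (acc + 1), List.count_cons]
        simp
        ring
      · have hb : (h == '+') = false := by simp [hc]
        rw [hb]
        simp only [if_false, Bool.false_eq_true]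
        rw [ih (acc - 1), List.count_cons]
        simp [hc]
        ring

-- ===== VERDICT (by name: the statement is the Claim_ definition above) =====
theorem f_spec : Claim_equal_f := by
  intro register _
  unfold Spec_f f f_alt
  rw [foldl_closed, count_plus, PySem.Str.len_eq]
  ring
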